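-- pv_equiv track=rewrite | github.com/konszymanski/leetcode-dataset | obfuscated_solutions/python/2940-find-building-where-alice-and-bob-can-meet/solution_1_l0_l1_l3.py | v11_792
-- ===== SOURCE A (Python) =====
-- def v11_792(v13_658, v1_754):
--     v14_189 = 0
--     if len('abc') == 3:
--         v15_704 = len(v1_754) - 1
--     v16_532 = -1
--     while v14_189 <= v15_704:
--         v17_132 = (v14_189 + v15_704) // 2
--         if v1_754[v17_132][0] > v13_658:
--             if 1 + 1 == 2:
--                 v16_532 = max(v16_532, v17_132)
--             v14_189 = v17_132 + 1
--         elif len('abc') == 3: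
--             v15_704 = v17_132 - 1
--     return v16_532
-- ===== SOURCE B (Python) =====
-- def v11_792(v13_658, v1_754):
--     def go(xs, base):
--         if not xs:
--             return -1
--         k = (len(xs) - 1) // 2
--         if xs[k][0] > v13_658:
--             r = go(xs[k + 1:], base + k + 1)
--             return base + k if r == -1 else r
--         return go(xs[:k], base)
--     return go(v1_754, 0)
-- ===== Notes on version B (the rewrite author's own statement) =====
-- stated objective: alternative
-- what changed: Replaced the in-place index-interval while loop carrying a running best index with a divide-and-conquer recursion on list slices (xs[:k]/xs[k+1:]) with a base offset, returning the rightmost hit bottom-up instead of via a mutable max accumulator.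
import Mathlib
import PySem

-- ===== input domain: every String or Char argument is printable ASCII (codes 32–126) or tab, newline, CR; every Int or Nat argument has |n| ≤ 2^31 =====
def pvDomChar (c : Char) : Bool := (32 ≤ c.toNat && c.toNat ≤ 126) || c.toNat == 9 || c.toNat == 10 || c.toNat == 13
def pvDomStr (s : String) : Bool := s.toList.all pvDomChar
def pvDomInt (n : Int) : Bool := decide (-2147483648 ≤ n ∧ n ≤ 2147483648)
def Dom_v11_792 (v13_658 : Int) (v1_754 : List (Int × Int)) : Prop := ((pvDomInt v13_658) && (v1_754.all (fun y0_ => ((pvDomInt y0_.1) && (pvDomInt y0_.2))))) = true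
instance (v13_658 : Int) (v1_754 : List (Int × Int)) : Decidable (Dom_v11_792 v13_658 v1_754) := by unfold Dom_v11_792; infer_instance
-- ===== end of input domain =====

-- B replaces the index-interval while loop with a mutable max accumulator by a divide-and-conquer
-- recursion on list slices with a base offset, returning the rightmost hit bottom-up; objective: alternative.


-- ===== PORT A =====
-- A's while loop, one constructor of fuel per iteration (fuel = length+1 bounds the iteration
-- count, since the interval width strictly shrinks each step; the fuel only makes the recursion
-- structural, it never cuts the computation short).  The probed index v17_132 is always in range
-- on the reachable states (0 ≤ lo ≤ mid ≤ hi < length), so '.getD (0,0)' is exact there.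
def v11_792Loop (v13_658 : Int) (v1_754 : List (Int × Int)) : Nat → Int → Int → Int → Int
  | 0, _, _, v16_532 => v16_532
  | fuel + 1, v14_189, v15_704, v16_532 =>
    if v14_189 ≤ v15_704 then
      -- v17_132 = (v14_189 + v15_704) // 2, written out at each use
      if ((PySem.List.pyGet? v1_754 (PySem.Int.floordiv (v14_189 + v15_704) 2)).getD (0,0)).1 > v13_658 then
        v11_792Loop v13_658 v1_754 fuel (PySem.Int.floordiv (v14_189 + v15_704) 2 + 1) v15_704 (max v16_532 (PySem.Int.floordiv (v14_189 + v15_704) 2))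
      else
        v11_792Loop v13_658 v1_754 fuel v14_189 (PySem.Int.floordiv (v14_189 + v15_704) 2 - 1) v16_532
    else v16_532

def v11_792 (v13_658 : Int) (v1_754 : List (Int × Int)) : Int :=
  v11_792Loop v13_658 v1_754 (v1_754.length + 1) 0 ((v1_754.length : Int) - 1)  (-1)

-- ===== PORT B =====
-- Source B's 'base + k if r == -1 else r' combination of the right recursion's result
def pvPick (base : Int) (k : Nat) (r : Int) : Int := if r = -1 then base + (k : Int) else r

-- Source B's divide-and-conquer helper go(xs, base): structural recursion on the slice xs
-- (xs[:k] → List.take k, xs[k+1:] → List.drop (k+1); both slice bounds are nonnegative and in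
-- range, so take/drop are exact); xs[k] is a plain in-range index, so 'List.getD' is exact.
-- k = (len(xs) - 1) // 2 is written out at each use.
def v11_792Go (v13_658 : Int) (xs : List (Int × Int)) (base : Int) : Int :=
  if xs.isEmpty then -1
  else if (xs.getD ((xs.length - 1) / 2) (0, 0)).1 > v13_658 then
    pvPick base ((xs.length - 1) / 2)
      (v11_792Go v13_658 (xs.drop ((xs.length - 1) / 2 + 1)) (base + (((xs.length - 1) / 2 : Nat) : Int) + 1))
  else v11_792Go v13_658 (xs.take ((xs.length - 1) / 2)) base
termination_by xs.length
decreasing_by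
  · rename_i hne _
    have hlen : xs.length ≠ 0 := by simpa [List.isEmpty_iff_length_eq_zero] using hne
    simp [List.length_drop]; omega
  · rename_i hne _
    have hlen : xs.length ≠ 0 := by simpa [List.isEmpty_iff_length_eq_zero] using hne
    simp [List.length_take]; omega

def v11_792_alt (v13_658 : Int) (v1_754 : List (Int × Int)) : Int :=
  v11_792Go v13_658 v1_754 0

-- ===== PRECONDITION & SPEC =====
def Spec_v11_792 (v13_658 : Int) (v1_754 : List (Int × Int)) (out : Int) : Prop := out = v11_792_alt v13_658 v1_754
instance (v13_658 : Int) (v1_754 : List (Int × Int)) (out : Int) : Decidable (Spec_v11_792 v13_658 v1_754 out) := by unfold Spec_v11_792; infer_instance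

-- ===== CLAIM (what is proved, stated in full; the proofs are below) =====
def Claim_equal_v11_792 : Prop := ∀ (v13_658 : Int) (v1_754 : List (Int × Int)), Dom_v11_792 v13_658 v1_754 → Spec_v11_792 v13_658 v1_754 (v11_792 v13_658 v1_754)

-- ===== LEMMAS AND PROOFS =====

theorem v11_792Go_nil (v13_658 base : Int) : v11_792Go v13_658 [] base = -1 := by
  rw [v11_792Go]; norm_num

-- B's helper returns -1 or an index ≥ base (strong induction on the slice length).
theorem v11_792Go_lower (v13_658 : Int) (n : Nat) :
    ∀ (xs : List (Int × Int)) (base : Int), xs.length ≤ n →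
      v11_792Go v13_658 xs base = -1 ∨ base ≤ v11_792Go v13_658 xs base := by
  induction n with
  | zero =>
    intro xs base hlen
    cases xs with
    | nil => exact Or.inl (v11_792Go_nil v13_658 base)
    | cons x xs => simp at hlen
  | succ n ih =>
    intro xs base hlen
    rw [v11_792Go]
    split
    · exact Or.inl rfl
    · rename_i hne
      have hL : xs.length ≠ 0 := by simpa [List.isEmpty_iff_length_eq_zero] using hne
      split
      · have hdrop : (xs.drop ((xs.length - 1) / 2 + 1)).length ≤ n := by
          simp [List.length_drop]; omega
        unfold pvPick
        split
        · right; omega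
        · rename_i hr
          rcases ih (xs.drop ((xs.length - 1) / 2 + 1))
              (base + (((xs.length - 1) / 2 : Nat) : Int) + 1) hdrop with h | h
          · exact absurd h hr
          · right; omega
      · have htake : (xs.take ((xs.length - 1) / 2)).length ≤ n := by
          simp [List.length_take]; omega
        exact ih _ base htake

-- A's loop on the interval [a, a+n-1] equals the max of its accumulator and B's recursion on
-- the slice (drop a).take n with base a: both probe the element at index a + (n-1)/2 and take
-- the same branch at every step, so the two recursions stay in lock-step.
theorem loop_eq_go (v13_658 : Int) (v1_754 : List (Int × Int)) :
    ∀ (fuel a n : Nat) (best : Int), n < fuel → a + n ≤ v1_754.length → -1 ≤ best →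
      v11_792Loop v13_658 v1_754 fuel (a : Int) ((a : Int) + (n : Int) - 1) best
        = max best (v11_792Go v13_658 ((v1_754.drop a).take n) (a : Int)) := by
  intro fuel
  induction fuel with
  | zero => intro a n best hfuel _ _; exact absurd hfuel (by omega)
  | succ fuel ih =>
    intro a n best hfuel hlen hb
    by_cases hn0 : n = 0
    · subst hn0
      rw [v11_792Loop, if_neg (by omega)]
      rw [List.take_zero, v11_792Go_nil]
      omega
    · -- n ≥ 1; the probed absolute index is a + k with k = (n-1)/2 < n
      have hk : (n - 1) / 2 < n := by omega
      rw [v11_792Loop, if_pos (by omega)]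
      have hmid : PySem.Int.floordiv ((a:Int) + ((a:Int) + (n:Int) - 1)) 2
          = ((a + (n-1)/2 : Nat) : Int) := by
        rw [PySem.Int.floordiv_eq_ediv_of_pos (by omega)]; omega
      rw [hmid, PySem.List.pyGet?_natCast]
      have hxslen : ((v1_754.drop a).take n).length = n := by
        simp [List.length_take, List.length_drop]; omega
      have hxnil : ¬ (((v1_754.drop a).take n).isEmpty = true) := fun hemp =>
        hn0 (by rw [← hxslen]; exact List.isEmpty_iff_length_eq_zero.mp hemp)
      rw [v11_792Go, if_neg hxnil, hxslen]
      have hget : ((v1_754.drop a).take n).getD ((n - 1) / 2) (0,0)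
          = (v1_754[a + (n-1)/2]?).getD (0,0) := by
        rw [List.getD_eq_getElem?_getD, List.getElem?_take_of_lt hk, List.getElem?_drop]
      rw [hget]
      split
      · -- element > target: both go right; best becomes max best (a+k)
        have hxdrop : ((v1_754.drop a).take n).drop ((n-1)/2 + 1)
            = (v1_754.drop (a + (n-1)/2 + 1)).take (n - ((n-1)/2 + 1)) := by
          rw [List.drop_take, List.drop_drop, Nat.add_assoc]
        have harg : ((a + (n-1)/2 : Nat) : Int) + 1 = ((a + (n-1)/2 + 1 : Nat) : Int) := by omega
        have hbase : (a : Int) + (((n-1)/2 : Nat) : Int) + 1 = ((a + (n-1)/2 + 1 : Nat) : Int) := by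
          omega
        have hhi : (a:Int) + (n:Int) - 1
            = ((a + (n-1)/2 + 1 : Nat) : Int) + ((n - ((n-1)/2 + 1) : Nat) : Int) - 1 := by omega
        rw [harg, hhi, hxdrop, hbase,
          ih (a + (n-1)/2 + 1) (n - ((n-1)/2 + 1)) (max best ((a + (n-1)/2 : Nat) : Int))
            (by omega) (by omega) (by omega)]
        unfold pvPick
        rcases v11_792Go_lower v13_658
            ((v1_754.drop (a + (n-1)/2 + 1)).take (n - ((n-1)/2 + 1))).length
            ((v1_754.drop (a + (n-1)/2 + 1)).take (n - ((n-1)/2 + 1)))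
            ((a + (n-1)/2 + 1 : Nat) : Int) le_rfl with h | h
        · rw [h, if_pos rfl]; omega
        · rw [if_neg (by omega)]; omega
      · -- element ≤ target: both go left on [a, a+k-1] / take k
        have hxtake : ((v1_754.drop a).take n).take ((n-1)/2) = (v1_754.drop a).take ((n-1)/2) := by
          rw [List.take_take, Nat.min_eq_left (by omega)]
        have hhi : ((a + (n-1)/2 : Nat) : Int) - 1 = (a:Int) + (((n-1)/2 : Nat) : Int) - 1 := by omega
        rw [hhi, hxtake, ih a ((n-1)/2) best (by omega) (by omega) hb]

-- ===== VERDICT (by name: the statement is the Claim_ definition above) =====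
theorem v11_792_spec : Claim_equal_v11_792 := by
  intro v13_658 v1_754 _
  unfold Spec_v11_792 v11_792 v11_792_alt
  have h := loop_eq_go v13_658 v1_754 (v1_754.length + 1) 0 v1_754.length (-1)
    (by omega) (by omega) (by omega)
  simp only [Nat.cast_zero, zero_add, List.drop_zero, List.take_length] at h
  rw [h]
  rcases v11_792Go_lower v13_658 v1_754.length v1_754 0 le_rfl with h1 | h1 <;> omega
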